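-- pv_equiv track=rewrite | github.com/DmitryVlaznev/leetcode | 2355-maximum-number-of-books-you-can-take.py | maximumBooks3
-- ===== SOURCE A (Python) =====
-- from typing import List
-- from functools import lru_cache
--
-- def maximumBooks3(books: List[int]) -> int:
--     @lru_cache(maxsize=None)
--     def dp(i, last):
--         if i == len(books):
--             return 0
--         res = 0
--         if last == 0:
--             res = dp(i + 1, 0)
--         for j in range(last + 1, books[i] + 1):
--             res = max(res, j + dp(i + 1, j))
--         return res
--
--     return dp(0, 0)
-- ===== SOURCE B (Python) =====
-- from typing import List
--
-- def maximumBooks3(books: List[int]) -> int: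
--     # Per-endpoint greedy: the best run ending at shelf r takes books[r] there
--     # and min(books[k], previous-1) going left while at least 1 book can be taken.
--     ans = 0
--     for r in range(len(books)):
--         v = books[r]
--         if v < 1:
--             continue
--         total = v
--         for k in range(r - 1, -1, -1):
--             v = min(books[k], v - 1)
--             if v < 1:
--                 break
--             total += v
--         if total > ans:
--             ans = total
--     return ans
-- ===== Notes on version B (the rewrite author's own statement) =====
-- stated objective: faster
-- what changed: Replaces A's memoized DP over (shelf index, last take count) -- which tries every possible take value j in range(last+1, books[i]+1) at every shelf -- with the standard per-endpoint greedy: for each shelf r take books[r] there and min(books[k], previous-1) walking left until no book can be taken, keeping the best total; no recursion, no enumeration of take values.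
import Mathlib
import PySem

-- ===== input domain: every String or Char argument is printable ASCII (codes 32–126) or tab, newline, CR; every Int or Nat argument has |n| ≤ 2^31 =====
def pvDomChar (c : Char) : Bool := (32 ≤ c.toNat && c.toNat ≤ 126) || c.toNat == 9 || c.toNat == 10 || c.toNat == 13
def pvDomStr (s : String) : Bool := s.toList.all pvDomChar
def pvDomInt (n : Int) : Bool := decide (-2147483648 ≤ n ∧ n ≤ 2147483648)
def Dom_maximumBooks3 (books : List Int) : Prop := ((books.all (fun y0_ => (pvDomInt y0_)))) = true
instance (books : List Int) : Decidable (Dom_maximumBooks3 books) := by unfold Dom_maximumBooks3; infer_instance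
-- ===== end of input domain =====

-- B replaces A's memoized DP over (index, last-take) — which enumerates every possible
-- take value j in range(last+1, books[i]+1) — by a per-endpoint greedy scan; objective: faster.

-- ===== PORT A =====
-- dp(i, last) of A, with the suffix books[i:] passed as a list (i = peeled prefix).
def pvDpA : List Int → Int → Int
  | [], _ => 0
  | b :: tl, last =>
    (PySem.List.pyRange (last + 1) (b + 1) 1).foldl (fun r j => max r (j + pvDpA tl j))
      (if last = 0 then pvDpA tl 0 else 0)

def maximumBooks3 (books : List Int) : Int := pvDpA books 0

-- ===== PORT B =====
-- inner loop of B: walk the reversed prefix, v := min(books[k], v-1), stop when v < 1; returns the added sum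
def pvChainB : List Int → Int → Int
  | [], _ => 0
  | c :: tl, v =>
    if min c (v - 1) < 1 then 0 else min c (v - 1) + pvChainB tl (min c (v - 1))

-- outer loop of B: rp = reversed prefix of shelves already passed, rest = shelves to come, ans = best so far
def pvGoB : List Int → List Int → Int → Int
  | _, [], ans => ans
  | rp, b :: tl, ans =>
    pvGoB (b :: rp) tl (if b < 1 then ans else max ans (b + pvChainB rp b))

def maximumBooks3_alt (books : List Int) : Int := pvGoB [] books 0

-- ===== PRECONDITION & SPEC =====
def Spec_maximumBooks3 (books : List Int) (out : Int) : Prop := out = maximumBooks3_alt books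
instance (books : List Int) (out : Int) : Decidable (Spec_maximumBooks3 books out) := by unfold Spec_maximumBooks3; infer_instance

-- ===== CLAIM (what is proved, stated in full; the proofs are below) =====
def Claim_equal_maximumBooks3 : Prop := ∀ (books : List Int), Dom_maximumBooks3 books → Spec_maximumBooks3 books (maximumBooks3 books)

-- ===== LEMMAS AND PROOFS =====

-- forced greedy chain over the (reversed) left context rp, previous take t:
-- returns (leftmost take, sum of the context takes); takes are min(cap, previous-1), no early stop.
def pvFc : List Int → Int → Int × Int
  | [], t => (t, 0)
  | c :: rp, t => ((pvFc rp (min c (t - 1))).1, min c (t - 1) + (pvFc rp (min c (t - 1))).2)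

-- value of the run ending at a fixed shelf with cap b that extends over exactly the
-- first m shelves of the reversed left context rp, threshold `last` (all takes > last); 0 if infeasible.
def pvSegVal (rp : List Int) (b : Int) (last : Int) (m : Nat) : Int :=
  if last < (pvFc (rp.take m) b).1 then b + (pvFc (rp.take m) b).2 else 0

-- best run ending at the shelf with cap b, left context rp, all takes > last
def pvEndBest (rp : List Int) (b : Int) (last : Int) : Int :=
  (List.range (rp.length + 1)).foldl (fun a m => max a (pvSegVal rp b last m)) 0

-- best run whose endpoint lies in rest, left context rp (the common spec)
def pvSpecV : List Int → List Int → Int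
  | _, [] => 0
  | rp, b :: tl => max (pvEndBest rp b 0) (pvSpecV (b :: rp) tl)

-- generic upper bound for a running max
theorem pvFoldmaxLe (g : Int → Int) (xs : List Int) (init X : Int)
    (h0 : init ≤ X) (h : ∀ j ∈ xs, g j ≤ X) :
    xs.foldl (fun a j => max a (g j)) init ≤ X := by
  induction xs generalizing init with
  | nil => exact h0
  | cons y ys ih =>
    apply ih
    · exact max_le h0 (h y (List.mem_cons_self))
    · exact fun j hj => h j (List.mem_cons_of_mem _ hj)

theorem pvFoldmaxLeNat (g : Nat → Int) (xs : List Nat) (init X : Int)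
    (h0 : init ≤ X) (h : ∀ j ∈ xs, g j ≤ X) :
    xs.foldl (fun a j => max a (g j)) init ≤ X := by
  induction xs generalizing init with
  | nil => exact h0
  | cons y ys ih =>
    apply ih
    · exact max_le h0 (h y (List.mem_cons_self))
    · exact fun j hj => h j (List.mem_cons_of_mem _ hj)

theorem pvDpA_nonneg (l : List Int) (last : Int) : 0 ≤ pvDpA l last := by
  induction l generalizing last with
  | nil => simp [pvDpA]
  | cons b tl ih =>
    simp only [pvDpA]
    refine le_trans ?_ (PySem.List.le_foldl_max_int _ (fun j => j + pvDpA tl j) _).1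
    split
    · exact ih 0
    · exact le_refl 0

theorem pvEndBest_nonneg (rp : List Int) (b last : Int) : 0 ≤ pvEndBest rp b last :=
  (PySem.List.le_foldl_max_int _ (pvSegVal rp b last) 0).1

theorem pvSpecV_nonneg (rp rest : List Int) : 0 ≤ pvSpecV rp rest := by
  induction rest generalizing rp with
  | nil => simp [pvSpecV]
  | cons b tl ih => exact le_trans (ih (b :: rp)) (le_max_right _ _)

theorem pvFc_fst_le (rp : List Int) (t : Int) : (pvFc rp t).1 ≤ t := by
  induction rp generalizing t with
  | nil => simp [pvFc]
  | cons c rp ih =>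
    simp only [pvFc]
    have := ih (min c (t - 1))
    omega

-- B's greedy chain value equals the best feasible forced chain
theorem pvSegVal_zero (rp : List Int) (b last : Int) :
    pvSegVal rp b last 0 = if last < b then b else 0 := by
  simp [pvSegVal, pvFc]

theorem pvSegVal_cons_succ (c : Int) (rp : List Int) (b last : Int) (m : Nat) :
    pvSegVal (c :: rp) b last (m + 1) =
      if last < (pvFc (rp.take m) (min c (b - 1))).1 then
        b + (min c (b - 1) + (pvFc (rp.take m) (min c (b - 1))).2)
      else 0 := by
  simp [pvSegVal, pvFc]

theorem pvSegVal_le_endBest (rp : List Int) (b last : Int) (m : Nat) (hm : m < rp.length + 1) :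
    pvSegVal rp b last m ≤ pvEndBest rp b last :=
  (PySem.List.le_foldl_max_int _ (pvSegVal rp b last) 0).2 m (List.mem_range.mpr hm)

theorem pvEndBest_le (rp : List Int) (b last X : Int) (h0 : 0 ≤ X)
    (h : ∀ m, m < rp.length + 1 → pvSegVal rp b last m ≤ X) : pvEndBest rp b last ≤ X := by
  unfold pvEndBest
  refine pvFoldmaxLeNat _ _ _ _ h0 ?_
  intro m hm
  exact h m (List.mem_range.mp hm)

theorem pvChainB_endBest (rp : List Int) (b : Int) :
    (if b < 1 then 0 else b + pvChainB rp b) = pvEndBest rp b 0 := by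
  induction rp generalizing b with
  | nil =>
    simp only [pvEndBest, List.length_nil, Nat.zero_add, List.range_one, List.foldl_cons,
      List.foldl_nil, pvSegVal_zero, pvChainB]
    split_ifs <;> omega
  | cons c rp ih =>
    by_cases hb : b < 1
    · rw [if_pos hb]
      refine le_antisymm (pvEndBest_nonneg _ _ _) ?_
      refine pvEndBest_le _ _ _ _ (le_refl 0) ?_
      intro m _
      match m with
      | 0 => rw [pvSegVal_zero]; split <;> omega
      | m + 1 =>
        rw [pvSegVal_cons_succ]
        have := pvFc_fst_le (rp.take m) (min c (b - 1))
        split <;> omega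
    · rw [if_neg hb]
      simp only [pvChainB]
      have hb0 : pvSegVal (c :: rp) b 0 0 ≤ pvEndBest (c :: rp) b 0 :=
        pvSegVal_le_endBest _ _ _ 0 (by simp)
      rw [pvSegVal_zero, if_pos (by omega : (0:Int) < b)] at hb0
      by_cases hw : min c (b - 1) < 1
      · rw [if_pos hw, add_zero]
        refine le_antisymm hb0 ?_
        refine pvEndBest_le _ _ _ _ (by omega) ?_
        intro m _
        match m with
        | 0 => rw [pvSegVal_zero]; split <;> omega
        | m + 1 =>
          rw [pvSegVal_cons_succ]
          have := pvFc_fst_le (rp.take m) (min c (b - 1))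
          split <;> omega
      · rw [if_neg hw]
        have hIH := ih (min c (b - 1))
        rw [if_neg hw] at hIH
        have hEnn := pvEndBest_nonneg rp (min c (b - 1)) 0
        refine le_antisymm ?_ ?_
        · -- b + (w + chain) = b + endBest rp w ≤ endBest (c::rp) b
          rw [hIH]
          have hkey : pvEndBest rp (min c (b - 1)) 0 ≤ pvEndBest (c :: rp) b 0 - b := by
            refine pvEndBest_le _ _ _ _ (by omega) ?_
            intro m hm
            have hterm : pvSegVal (c :: rp) b 0 (m + 1) ≤ pvEndBest (c :: rp) b 0 :=
              pvSegVal_le_endBest _ _ _ (m + 1) (by simp; omega)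
            rw [pvSegVal_cons_succ] at hterm
            simp only [pvSegVal]
            have := pvFc_fst_le (rp.take m) (min c (b - 1))
            split_ifs at hterm ⊢ <;> omega
          omega
        · rw [hIH]
          refine pvEndBest_le _ _ _ _ (by omega) ?_
          intro m _
          match m with
          | 0 => rw [pvSegVal_zero]; split <;> omega
          | m + 1 =>
            by_cases hmrange : m < rp.length + 1
            · have hle : pvSegVal rp (min c (b - 1)) 0 m ≤ pvEndBest rp (min c (b - 1)) 0 :=
                pvSegVal_le_endBest _ _ _ m hmrange
              rw [pvSegVal_cons_succ]
              simp only [pvSegVal] at hle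
              split_ifs at hle ⊢ <;> omega
            · have htk : rp.take m = rp := List.take_of_length_le (by omega)
              have hle : pvSegVal rp (min c (b - 1)) 0 rp.length ≤ pvEndBest rp (min c (b - 1)) 0 :=
                pvSegVal_le_endBest _ _ _ rp.length (by omega)
              simp only [pvSegVal, List.take_length] at hle
              rw [pvSegVal_cons_succ, htk]
              split_ifs at hle ⊢ <;> omega

-- B's loop accumulates the spec
theorem pvGoB_spec (rest rp : List Int) (ans : Int) (hans : 0 ≤ ans) :
    pvGoB rp rest ans = max ans (pvSpecV rp rest) := by
  induction rest generalizing rp ans with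
  | nil => simp [pvGoB, pvSpecV, max_eq_left hans]
  | cons b tl ih =>
    have hE := pvChainB_endBest rp b
    simp only [pvGoB, pvSpecV]
    by_cases hb : b < 1
    · rw [if_pos hb]
      rw [if_pos hb] at hE
      rw [ih _ _ hans, ← hE]
      have := pvSpecV_nonneg (b :: rp) tl
      omega
    · rw [if_neg hb]
      rw [if_neg hb] at hE
      rw [ih _ _ (le_trans hans (le_max_left _ _)), hE, max_assoc]

-- appending one shelf on the far-left end of the context extends the forced chain
theorem pvFc_append (rp : List Int) (x t : Int) :
    pvFc (rp ++ [x]) t = (min x ((pvFc rp t).1 - 1), (pvFc rp t).2 + min x ((pvFc rp t).1 - 1)) := by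
  induction rp generalizing t with
  | nil => simp [pvFc]
  | cons c rp ih =>
    simp only [List.cons_append, pvFc, ih (min c (t - 1))]
    rw [Prod.mk.injEq]
    exact ⟨rfl, by ring⟩

theorem pvEndBest_append (rp : List Int) (x b last : Int) :
    pvEndBest (rp ++ [x]) b last =
      max (pvEndBest rp b last)
        (if last < (pvFc (rp ++ [x]) b).1 then b + (pvFc (rp ++ [x]) b).2 else 0) := by
  unfold pvEndBest
  have hlen : (rp ++ [x]).length + 1 = (rp.length + 1) + 1 := by simp
  rw [hlen, List.range_succ, List.foldl_append]
  have hcongr : (List.range (rp.length + 1)).foldl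
      (fun a m => max a (pvSegVal (rp ++ [x]) b last m)) 0 =
      (List.range (rp.length + 1)).foldl (fun a m => max a (pvSegVal rp b last m)) 0 := by
    refine PySem.List.foldl_congr_mem _ _ _ _ ?_
    intro acc m hm
    have hm' : m ≤ rp.length := by
      have := List.mem_range.mp hm; omega
    simp [pvSegVal, List.take_append_of_le_length hm']
  rw [hcongr]
  simp only [List.foldl_cons, List.foldl_nil]
  have htake : (rp ++ [x]).take (rp.length + 1) = rp ++ [x] := by
    apply List.take_of_length_le
    simp
  simp [pvSegVal, htake]

-- unfolding equation for the port of A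
theorem pvDpA_cons (b : Int) (tl : List Int) (last : Int) :
    pvDpA (b :: tl) last = (PySem.List.pyRange (last + 1) (b + 1) 1).foldl
      (fun r j => max r (j + pvDpA tl j)) (if last = 0 then pvDpA tl 0 else 0) := by
  simp [pvDpA]

theorem pvDpA_nil (last : Int) : pvDpA [] last = 0 := by
  simp [pvDpA]

-- A with last ≥ 1: appending a shelf adds exactly the full forced chain as a candidate
theorem pvDpA_snoc_pos (xs : List Int) (b last : Int) (h : 1 ≤ last) :
    pvDpA (xs ++ [b]) last =
      max (pvDpA xs last)
        (if last < (pvFc xs.reverse b).1 then b + (pvFc xs.reverse b).2 else 0) := by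
  induction xs generalizing last with
  | nil =>
    simp only [List.nil_append, List.reverse_nil, pvFc, pvDpA_nil, pvDpA_cons,
      if_neg (show ¬ last = 0 by omega)]
    simp only [add_zero]
    by_cases hlb : last < b
    · rw [if_pos hlb]
      refine le_antisymm ?_ ?_
      · refine pvFoldmaxLe _ _ _ _ (by omega) ?_
        intro j hj
        have hj' := PySem.List.mem_pyRange_one.mp hj
        omega
      · have hmem : b ∈ PySem.List.pyRange (last + 1) (b + 1) 1 :=
          PySem.List.mem_pyRange_one.mpr ⟨by omega, by omega⟩
        have := (PySem.List.le_foldl_max_int (PySem.List.pyRange (last + 1) (b + 1) 1)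
          (fun j => j) 0).2 b hmem
        omega
    · rw [if_neg hlb, PySem.List.pyRange_one_eq_nil (by omega : b + 1 ≤ last + 1)]
      simp
  | cons x xs' ih =>
    have hrev : (x :: xs').reverse = xs'.reverse ++ [x] := by simp
    rw [List.cons_append, pvDpA_cons, if_neg (show ¬ last = 0 by omega), hrev, pvFc_append]
    set v0 := (pvFc xs'.reverse b).1 with hv0
    set s := (pvFc xs'.reverse b).2 with hs
    have hcongr : (PySem.List.pyRange (last + 1) (x + 1) 1).foldl
        (fun r j => max r (j + pvDpA (xs' ++ [b]) j)) 0
        = (PySem.List.pyRange (last + 1) (x + 1) 1).foldl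
        (fun r j => max r (j + max (pvDpA xs' j) (if j < v0 then b + s else 0))) 0 := by
      refine PySem.List.foldl_congr_mem _ _ _ _ ?_
      intro acc j hj
      have hj' := PySem.List.mem_pyRange_one.mp hj
      rw [ih j (by omega)]
    rw [hcongr, pvDpA_cons, if_neg (show ¬ last = 0 by omega)]
    set F := (PySem.List.pyRange (last + 1) (x + 1) 1).foldl
      (fun r j => max r (j + pvDpA xs' j)) 0 with hF
    set G := (PySem.List.pyRange (last + 1) (x + 1) 1).foldl
      (fun r j => max r (j + max (pvDpA xs' j) (if j < v0 then b + s else 0))) 0 with hG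
    have hFi : (0:Int) ≤ F :=
      (PySem.List.le_foldl_max_int _ (fun j => j + pvDpA xs' j) 0).1
    have hFt : ∀ j ∈ PySem.List.pyRange (last + 1) (x + 1) 1, j + pvDpA xs' j ≤ F :=
      (PySem.List.le_foldl_max_int _ (fun j => j + pvDpA xs' j) 0).2
    have hGi : (0:Int) ≤ G :=
      (PySem.List.le_foldl_max_int _ (fun j => j + max (pvDpA xs' j) (if j < v0 then b + s else 0)) 0).1
    have hGt : ∀ j ∈ PySem.List.pyRange (last + 1) (x + 1) 1,
        j + max (pvDpA xs' j) (if j < v0 then b + s else 0) ≤ G :=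
      (PySem.List.le_foldl_max_int _ (fun j => j + max (pvDpA xs' j) (if j < v0 then b + s else 0)) 0).2
    refine le_antisymm ?_ ?_
    · refine pvFoldmaxLe _ _ _ _ (by omega) ?_
      intro j hj
      have hj' := PySem.List.mem_pyRange_one.mp hj
      have hP := pvDpA_nonneg xs' j
      have hFj := hFt j hj
      by_cases hcase : j < v0
      · rw [if_pos hcase]
        rw [if_pos (show last < min x (v0 - 1) by omega)]
        omega
      · rw [if_neg hcase]
        omega
    · refine max_le ?_ ?_
      · refine pvFoldmaxLe _ _ _ _ hGi ?_
        intro j hj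
        have := hGt j hj
        omega
      · by_cases hlw : last < min x (v0 - 1)
        · rw [if_pos hlw]
          have hmem : min x (v0 - 1) ∈ PySem.List.pyRange (last + 1) (x + 1) 1 :=
            PySem.List.mem_pyRange_one.mpr ⟨by omega, by omega⟩
          have := hGt _ hmem
          rw [if_pos (show min x (v0 - 1) < v0 by omega)] at this
          omega
        · rw [if_neg hlw]
          exact hGi

-- A with last = 0: appending a shelf adds the best run ending there
theorem pvDpA_snoc_zero (xs : List Int) (b : Int) :
    pvDpA (xs ++ [b]) 0 = max (pvDpA xs 0) (pvEndBest xs.reverse b 0) := by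
  induction xs with
  | nil =>
    rw [List.nil_append, List.reverse_nil, pvDpA_cons, pvDpA_nil]
    simp only [pvDpA_nil, add_zero, ite_self]
    have hEB : pvEndBest ([] : List Int) b 0 = if 0 < b then b else 0 := by
      simp only [pvEndBest, List.length_nil, Nat.zero_add, List.range_one, List.foldl_cons,
        List.foldl_nil, pvSegVal_zero]
      split <;> omega
    rw [hEB]
    by_cases hlb : (0:Int) < b
    · rw [if_pos hlb]
      refine le_antisymm ?_ ?_
      · refine pvFoldmaxLe _ _ _ _ (by omega) ?_
        intro j hj
        have hj' := PySem.List.mem_pyRange_one.mp hj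
        omega
      · have hmem : b ∈ PySem.List.pyRange (0 + 1) (b + 1) 1 :=
          PySem.List.mem_pyRange_one.mpr ⟨by omega, by omega⟩
        have := (PySem.List.le_foldl_max_int (PySem.List.pyRange (0 + 1) (b + 1) 1)
          (fun j => j) 0).2 b hmem
        omega
    · rw [if_neg hlb, PySem.List.pyRange_one_eq_nil (by omega : b + 1 ≤ 0 + 1)]
      simp
  | cons x xs' ih =>
    have hrev : (x :: xs').reverse = xs'.reverse ++ [x] := by simp
    rw [List.cons_append, pvDpA_cons, if_pos rfl, hrev, pvEndBest_append, pvFc_append]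
    set v0 := (pvFc xs'.reverse b).1 with hv0
    set s := (pvFc xs'.reverse b).2 with hs
    set E := pvEndBest xs'.reverse b 0 with hE
    have hcongr : (PySem.List.pyRange (0 + 1) (x + 1) 1).foldl
        (fun r j => max r (j + pvDpA (xs' ++ [b]) j)) (pvDpA (xs' ++ [b]) 0)
        = (PySem.List.pyRange (0 + 1) (x + 1) 1).foldl
        (fun r j => max r (j + max (pvDpA xs' j) (if j < v0 then b + s else 0)))
        (max (pvDpA xs' 0) E) := by
      rw [ih]
      refine PySem.List.foldl_congr_mem _ _ _ _ ?_
      intro acc j hj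
      have hj' := PySem.List.mem_pyRange_one.mp hj
      rw [pvDpA_snoc_pos xs' b j (by omega)]
    rw [hcongr, pvDpA_cons, if_pos rfl]
    set F := (PySem.List.pyRange (0 + 1) (x + 1) 1).foldl
      (fun r j => max r (j + pvDpA xs' j)) (pvDpA xs' 0) with hF
    set G := (PySem.List.pyRange (0 + 1) (x + 1) 1).foldl
      (fun r j => max r (j + max (pvDpA xs' j) (if j < v0 then b + s else 0)))
      (max (pvDpA xs' 0) E) with hG
    have hP0 := pvDpA_nonneg xs' 0
    have hEnn : (0:Int) ≤ E := pvEndBest_nonneg _ _ _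
    have hFi : pvDpA xs' 0 ≤ F :=
      (PySem.List.le_foldl_max_int _ (fun j => j + pvDpA xs' j) _).1
    have hFt : ∀ j ∈ PySem.List.pyRange (0 + 1) (x + 1) 1, j + pvDpA xs' j ≤ F :=
      (PySem.List.le_foldl_max_int _ (fun j => j + pvDpA xs' j) _).2
    have hGi : max (pvDpA xs' 0) E ≤ G :=
      (PySem.List.le_foldl_max_int _ (fun j => j + max (pvDpA xs' j) (if j < v0 then b + s else 0)) _).1
    have hGt : ∀ j ∈ PySem.List.pyRange (0 + 1) (x + 1) 1,
        j + max (pvDpA xs' j) (if j < v0 then b + s else 0) ≤ G :=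
      (PySem.List.le_foldl_max_int _ (fun j => j + max (pvDpA xs' j) (if j < v0 then b + s else 0)) _).2
    refine le_antisymm ?_ ?_
    · refine pvFoldmaxLe _ _ _ _ (by omega) ?_
      intro j hj
      have hj' := PySem.List.mem_pyRange_one.mp hj
      have hP := pvDpA_nonneg xs' j
      have hFj := hFt j hj
      by_cases hcase : j < v0
      · rw [if_pos hcase]
        rw [if_pos (show (0:Int) < min x (v0 - 1) by omega)]
        omega
      · rw [if_neg hcase]
        omega
    · refine max_le ?_ ?_
      · refine pvFoldmaxLe _ _ _ _ (by omega) ?_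
        intro j hj
        have := hGt j hj
        omega
      · refine max_le (by omega) ?_
        by_cases hlw : (0:Int) < min x (v0 - 1)
        · rw [if_pos hlw]
          have hmem : min x (v0 - 1) ∈ PySem.List.pyRange (0 + 1) (x + 1) 1 :=
            PySem.List.mem_pyRange_one.mpr ⟨by omega, by omega⟩
          have := hGt _ hmem
          rw [if_pos (show min x (v0 - 1) < v0 by omega)] at this
          omega
        · rw [if_neg hlw]
          omega

theorem pvSpecV_snoc (xs : List Int) (rp : List Int) (b : Int) :
    pvSpecV rp (xs ++ [b]) = max (pvSpecV rp xs) (pvEndBest (xs.reverse ++ rp) b 0) := by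
  induction xs generalizing rp with
  | nil =>
    simp only [List.nil_append, List.reverse_nil, pvSpecV]
    rw [max_comm]
  | cons y ys ih =>
    simp only [List.cons_append, pvSpecV, ih (y :: rp)]
    rw [← max_assoc]
    congr 2
    simp

theorem pvDpA_spec (l : List Int) : pvDpA l 0 = pvSpecV [] l := by
  induction l using List.reverseRecOn with
  | nil => simp [pvDpA_nil, pvSpecV]
  | append_singleton xs b ih =>
    rw [pvDpA_snoc_zero, ih, pvSpecV_snoc xs [] b, List.append_nil]

-- ===== VERDICT (by name: the statement is the Claim_ definition above) =====
theorem maximumBooks3_spec : Claim_equal_maximumBooks3 := by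
  intro books _
  unfold Spec_maximumBooks3 maximumBooks3 maximumBooks3_alt
  rw [pvDpA_spec, pvGoB_spec _ _ _ (le_refl 0)]
  exact (max_eq_right (pvSpecV_nonneg _ _)).symm
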